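-- pv_equiv track=rewrite | github.com/muneebaifrah/Unstop-100-Days-Coding-Sprint | Day-73/2.Alpha_bitwise_operation.py | alpha_bitwise_operation
-- ===== SOURCE A (Python) =====
-- def alpha_bitwise_operation(n, arr):
--     """
--     Write your logic here.
--     Parameters:
--         n (int): Size of the array
--         arr (list): List of integers representing the array
--     Returns:
--         int: Result of the alpha bitwise operation
--     """
--     result = 0
--     for bit in range(30):  # Increase the bit range from 20 to 30
--         count = sum((num >> bit) & 1 for num in arr)  # Count set bits at position `bit`
--         if count > n / 2:  # Majority check
--             result |= (1 << bit)  # Set the bit in the result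
--     return result
--     pass
-- ===== SOURCE B (Python) =====
-- def alpha_bitwise_operation(n, arr):
--     counts = [0] * 30
--     for num in arr:
--         counts = [counts[b] + ((num >> b) & 1) for b in range(30)]
--     result = 0
--     for bit in range(30):
--         if counts[bit] > n / 2:
--             result |= (1 << bit)
--     return result
-- ===== Notes on version B (the rewrite author's own statement) =====
-- stated objective: alternative
-- what changed: A rescans arr once per bit position (30 scans, summing on the fly); B makes a single pass over arr maintaining a 30-entry bit-count table and then assembles the result from the table, keeping the float n/2 majority test.
import Mathlib
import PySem

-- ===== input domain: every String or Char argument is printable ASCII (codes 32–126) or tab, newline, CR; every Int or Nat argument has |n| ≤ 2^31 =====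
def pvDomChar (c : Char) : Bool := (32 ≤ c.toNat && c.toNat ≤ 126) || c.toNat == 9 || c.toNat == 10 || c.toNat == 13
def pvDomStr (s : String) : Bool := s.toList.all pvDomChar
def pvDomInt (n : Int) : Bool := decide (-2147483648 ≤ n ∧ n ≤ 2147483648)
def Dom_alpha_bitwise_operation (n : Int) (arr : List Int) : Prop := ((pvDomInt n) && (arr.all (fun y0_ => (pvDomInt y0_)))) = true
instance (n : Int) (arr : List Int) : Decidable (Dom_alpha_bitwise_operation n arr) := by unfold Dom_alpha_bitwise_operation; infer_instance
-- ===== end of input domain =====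

-- B replaces A's per-bit rescans of arr (30 passes) by one pass over arr that
-- maintains a 30-entry bit-count table, then assembles the result from that table
-- (objective: alternative decomposition, same asymptotic cost).
-- In both ports the Python float comparison 'count > n / 2' is modelled as
-- '2 * count > n': exact, since n/2 is an exact binary float for |n| ≤ 2^31 and
-- the integer count is represented exactly, so the float comparison agrees with
-- the rational one.  range(30) yields 0..29, so the shift amounts are the Nats 0..29.

-- ===== PORT A =====
def alpha_bitwise_operation (n : Int) (arr : List Int) : Int :=
  -- result = 0; for bit in range(30): count = sum((num >> bit) & 1 for num in arr); if count > n/2: result |= 1 << bit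
  (List.range 30).foldl (fun (result : Int) (bit : Nat) =>
    let count := arr.foldl (fun (s : Int) (num : Int) => s + PySem.Int.band (num >>> bit) 1) 0
    if 2 * count > n then PySem.Int.bor result ((1 : Int) <<< bit) else result) 0

-- ===== PORT B =====
def alpha_bitwise_operation_alt (n : Int) (arr : List Int) : Int :=
  -- counts = [0]*30; for num in arr: counts = [counts[b] + ((num >> b) & 1) for b in range(30)]
  let counts := arr.foldl
    (fun (cs : List Int) (num : Int) => (List.range 30).map (fun b => cs.getD b 0 + PySem.Int.band (num >>> b) 1))
    (List.replicate 30 (0 : Int))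
  -- result = 0; for bit in range(30): if counts[bit] > n/2: result |= 1 << bit
  (List.range 30).foldl (fun (result : Int) (bit : Nat) =>
    if 2 * (counts.getD bit 0) > n then PySem.Int.bor result ((1 : Int) <<< bit) else result) 0

-- ===== PRECONDITION & SPEC =====
def Spec_alpha_bitwise_operation (n : Int) (arr : List Int) (out : Int) : Prop := out = alpha_bitwise_operation_alt n arr
instance (n : Int) (arr : List Int) (out : Int) : Decidable (Spec_alpha_bitwise_operation n arr out) := by unfold Spec_alpha_bitwise_operation; infer_instance

-- ===== CLAIM (what is proved, stated in full; the proofs are below) =====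
def Claim_equal_alpha_bitwise_operation : Prop := ∀ (n : Int) (arr : List Int), Dom_alpha_bitwise_operation n arr → Spec_alpha_bitwise_operation n arr (alpha_bitwise_operation n arr)

-- ===== LEMMAS AND PROOFS =====

-- After folding B's per-element update over arr, entry b of the count table holds
-- its initial value plus A's per-bit sum over arr.
lemma counts_getD (arr : List Int) (cs : List Int) (h : cs.length = 30)
    (b : Nat) (hb : b < 30) :
    (arr.foldl (fun (cs : List Int) (num : Int) => (List.range 30).map
        (fun b => cs.getD b 0 + PySem.Int.band (num >>> b) 1)) cs).getD b 0
      = cs.getD b 0 + arr.foldl (fun (s : Int) (num : Int) => s + PySem.Int.band (num >>> b) 1) 0 := by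
  induction arr generalizing cs with
  | nil => simp
  | cons num rest ih =>
    simp only [List.foldl_cons]
    rw [ih _ (by simp)]
    have hget : ((List.range 30).map (fun b => cs.getD b 0 + PySem.Int.band (num >>> b) 1)).getD b 0
        = cs.getD b 0 + PySem.Int.band (num >>> b) 1 := by
      rw [List.getD_eq_getElem _ _ (by simpa using hb)]
      simp
    rw [hget]
    simp only [PySem.List.foldl_add]
    ring

theorem alpha_bitwise_operation_spec : Claim_equal_alpha_bitwise_operation := by
  intro n arr _
  show alpha_bitwise_operation n arr = alpha_bitwise_operation_alt n arr
  simp only [alpha_bitwise_operation, alpha_bitwise_operation_alt]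
  apply PySem.List.foldl_congr_mem
  intro acc bit hbit
  have hb : bit < 30 := List.mem_range.mp hbit
  rw [counts_getD arr _ (by simp) bit hb]
  have h0 : (List.replicate 30 (0:Int)).getD bit 0 = 0 := by interval_cases bit <;> rfl
  rw [h0, zero_add]

-- ===== VERDICT (by name: the statement is the Claim_ definition above) =====
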